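-- pv_equiv track=rewrite | github.com/fgarofalo56/Suppercharge_Microsoft_Fabric | tutorials/12-cicd-devops/scripts/validate_notebooks.py | preprocess_notebook_code
-- ===== SOURCE A (Python) =====
-- def preprocess_notebook_code(code: str) -> str:
--     """
--     Preprocess notebook code to handle magic commands and shell commands.
--
--     Magic commands (%) and shell commands (!) are not valid Python
--     and need to be removed or commented for syntax validation.
--
--     Args:
--         code: Raw notebook code
--
--     Returns:
--         Preprocessed code safe for ast.parse
--     """
--     lines = []
--     for line in code.split('\n'):
--         stripped = line.strip()
--         # Skip magic commands and shell commands
--         if stripped.startswith('%') or stripped.startswith('!'):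
--             # Replace with empty line to preserve line numbers
--             lines.append('')
--         # Skip Spark SQL magic blocks
--         elif stripped.startswith('%%'):
--             lines.append('')
--         else:
--             lines.append(line)
--     return '\n'.join(lines)
-- ===== SOURCE B (Python) =====
-- import re
--
-- _MAGIC_LINE = re.compile(r'^[ \t\r]*[%!].*$', re.MULTILINE)
--
-- def preprocess_notebook_code(code: str) -> str:
--     """Blank out magic (%) / shell (!) command lines in one regex pass,
--     keeping the newlines so line numbers are preserved."""
--     return _MAGIC_LINE.sub('', code)
-- ===== Notes on version B (the rewrite author's own statement) =====
-- stated objective: idiomatic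
-- what changed: Replaces the split/strip/branch/append/join per-line loop with a single multiline regex substitution that blanks each line whose first non-blank character is '%' or '!'.
import Mathlib
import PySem

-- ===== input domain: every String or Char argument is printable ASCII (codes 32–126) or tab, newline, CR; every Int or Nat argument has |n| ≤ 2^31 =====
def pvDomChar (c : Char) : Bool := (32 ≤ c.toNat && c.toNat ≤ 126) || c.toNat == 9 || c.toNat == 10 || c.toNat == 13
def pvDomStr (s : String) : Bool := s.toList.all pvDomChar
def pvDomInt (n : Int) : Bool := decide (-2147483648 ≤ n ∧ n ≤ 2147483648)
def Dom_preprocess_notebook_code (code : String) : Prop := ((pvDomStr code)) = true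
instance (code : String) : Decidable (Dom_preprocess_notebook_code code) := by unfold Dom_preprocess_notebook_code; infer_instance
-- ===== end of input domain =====

-- B replaces A's split/strip/branch/join per-line loop by a single regex-style left-to-right scan (more idiomatic one-pass rewrite; same cost).


-- ===== PORT A =====
-- literal port of A: split on '\n', per line strip + startswith branches appending to `lines`, then '\n'.join
def preprocess_notebook_code (code : String) : String :=
  let lines : List (List Char) :=
    (PySem.Chars.splitOn code.toList ['\n']).foldl (fun lines line =>
      let stripped := PySem.Chars.strip line
      if PySem.Chars.startswith stripped ['%'] || PySem.Chars.startswith stripped ['!'] then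
        lines ++ [([] : List Char)]
      else if PySem.Chars.startswith stripped ['%', '%'] then
        lines ++ [([] : List Char)]
      else
        lines ++ [line]) []
  String.ofList (PySem.Chars.join ['\n'] lines)

-- ===== PORT B =====
-- literal port of B's regex scan r'^[ \t\r]*[%!].*$' (MULTILINE), substituted by '':
-- at each line start collect [ \t\r]* into pend; on '%'/'!' drop to end of line, else emit the line as-is
mutual
def pvScan (pend : List Char) : List Char → List Char
  | [] => pend
  | c :: rest =>
    if c = '\n' then pend ++ '\n' :: pvScan [] rest
    else if c = ' ' ∨ c = '\t' ∨ c = '\r' then pvScan (pend ++ [c]) rest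
    else if c = '%' ∨ c = '!' then pvDrop rest
    else pend ++ c :: pvCopy rest
def pvDrop : List Char → List Char
  | [] => []
  | c :: rest => if c = '\n' then '\n' :: pvScan [] rest else pvDrop rest
def pvCopy : List Char → List Char
  | [] => []
  | c :: rest => if c = '\n' then '\n' :: pvScan [] rest else c :: pvCopy rest
end

def preprocess_notebook_code_alt (code : String) : String :=
  String.ofList (pvScan [] code.toList)

-- ===== PRECONDITION & SPEC =====
def Spec_preprocess_notebook_code (code : String) (out : String) : Prop := out = preprocess_notebook_code_alt code
instance (code : String) (out : String) : Decidable (Spec_preprocess_notebook_code code out) := by unfold Spec_preprocess_notebook_code; infer_instance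

-- ===== CLAIM (what is proved, stated in full; the proofs are below) =====
def Claim_equal_preprocess_notebook_code : Prop := ∀ (code : String), Dom_preprocess_notebook_code code → Spec_preprocess_notebook_code code (preprocess_notebook_code code)

-- ===== LEMMAS AND PROOFS =====

-- A's per-line replacement, as a function (proof-side only)
def gA (l : List Char) : List Char :=
  let stripped := PySem.Chars.strip l
  if PySem.Chars.startswith stripped ['%'] || PySem.Chars.startswith stripped ['!'] then []
  else if PySem.Chars.startswith stripped ['%', '%'] then []
  else l

-- structural version of splitting on '\n'
def splitNL : List Char → List (List Char)
  | [] => [[]]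
  | c :: r =>
    if c = '\n' then [] :: splitNL r
    else
      match splitNL r with
      | [] => [[c]]
      | h :: t => (c :: h) :: t

theorem splitNL_ne_nil (cs : List Char) : splitNL cs ≠ [] := by
  cases cs with
  | nil => simp [splitNL]
  | cons c r =>
    simp only [splitNL]
    split <;> [simp; (cases splitNL r <;> simp)]

theorem splitOn_go_eq (l : List Char) : ∀ (fuel : Nat), l.length < fuel → ∀ (cur : List Char) (acc : List (List Char)),
    PySem.Chars.splitOn.go ['\n'] fuel l cur acc = acc.reverse ++ (splitNL l).modifyHead (cur.reverse ++ ·) := by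
  induction l with
  | nil =>
    intro fuel hf cur acc
    obtain ⟨f, rfl⟩ : ∃ f, fuel = f + 1 := ⟨fuel - 1, by omega⟩
    simp [PySem.Chars.splitOn.go, splitNL]
  | cons c rest ih =>
    intro fuel hf cur acc
    obtain ⟨f, rfl⟩ : ∃ f, fuel = f + 1 := ⟨fuel - 1, by omega⟩
    rw [PySem.Chars.splitOn.go]
    by_cases hc : c = '\n'
    · subst hc
      simp only [List.isPrefixOf, BEq.rfl, Bool.and_self, if_true, List.length_cons,
        List.length_nil, Nat.zero_add, List.drop_succ_cons, List.drop_zero]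
      rw [ih f (by simpa using hf) [] (cur.reverse :: acc)]
      simp only [splitNL, if_true, List.reverse_cons, List.reverse_nil, List.nil_append,
        List.modifyHead_cons, List.append_assoc]
      cases splitNL rest <;> simp
    · have hpre : List.isPrefixOf ['\n'] (c :: rest) = false := by
        simp [List.isPrefixOf]; exact fun h => (hc h.symm).elim
      simp only [hpre, Bool.false_eq_true, if_false]
      rw [ih f (by simpa using hf) (c :: cur) acc]
      obtain ⟨h, t, hs⟩ : ∃ h t, splitNL rest = h :: t := by
        cases hsp : splitNL rest with
        | nil => exact absurd hsp (splitNL_ne_nil rest)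
        | cons h t => exact ⟨h, t, rfl⟩
      simp [splitNL, hc, hs]

theorem splitOn_eq (l : List Char) : PySem.Chars.splitOn l ['\n'] = splitNL l := by
  rw [PySem.Chars.splitOn, splitOn_go_eq l (l.length + 1) (by omega) [] []]
  obtain ⟨h, t, hs⟩ : ∃ h t, splitNL l = h :: t := by
    cases hsp : splitNL l with
    | nil => exact absurd hsp (splitNL_ne_nil l)
    | cons h t => exact ⟨h, t, rfl⟩
  simp [hs]

theorem ws3_isspace {x : Char} (h : x = ' ' ∨ x = '\t' ∨ x = '\r') : PySem.Chars.isspace x = true := by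
  rcases h with rfl | rfl | rfl <;> decide

theorem gA_allws (l : List Char) (h : ∀ x ∈ l, x = ' ' ∨ x = '\t' ∨ x = '\r') : gA l = l := by
  have hl : PySem.Chars.lstrip l = [] := by
    simp [PySem.Chars.lstrip, List.dropWhile_eq_nil_iff]
    exact fun x hx => ws3_isspace (h x hx)
  have hs : PySem.Chars.strip l = [] := by
    simp [PySem.Chars.strip, hl, PySem.Chars.rstrip]
  simp [gA, hs, PySem.Chars.startswith]

theorem strip_head (pend : List Char) (c : Char) (h : List Char)
    (hp : ∀ x ∈ pend, x = ' ' ∨ x = '\t' ∨ x = '\r') (hc : PySem.Chars.isspace c = false) :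
    ∃ u, PySem.Chars.strip (pend ++ c :: h) = c :: u := by
  have hpend : List.dropWhile PySem.Chars.isspace pend = [] :=
    List.dropWhile_eq_nil_iff.mpr (fun x hx => ws3_isspace (hp x hx))
  have hl : PySem.Chars.lstrip (pend ++ c :: h) = c :: h := by
    rw [PySem.Chars.lstrip, List.dropWhile_append, hpend]
    simp [hc]
  rw [PySem.Chars.strip, hl, PySem.Chars.rstrip]
  rw [List.reverse_cons, List.dropWhile_append]
  by_cases he : (List.dropWhile PySem.Chars.isspace h.reverse).isEmpty
  · simp [he, hc]
  · simp only [he, if_false, Bool.false_eq_true]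
    refine ⟨(List.dropWhile PySem.Chars.isspace h.reverse).reverse, ?_⟩
    rw [List.reverse_append]
    simp

theorem gA_line (pend : List Char) (c : Char) (h : List Char)
    (hp : ∀ x ∈ pend, x = ' ' ∨ x = '\t' ∨ x = '\r') (hc : PySem.Chars.isspace c = false) :
    gA (pend ++ c :: h) = if c = '%' ∨ c = '!' then [] else pend ++ c :: h := by
  obtain ⟨u, hu⟩ := strip_head pend c h hp hc
  simp only [gA, hu, PySem.Chars.startswith, List.isPrefixOf, Bool.and_true]
  by_cases h1 : c = '%'
  · simp [h1]
  · by_cases h2 : c = '!'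
    · simp [h2]
    · simp [h1, h2, beq_iff_eq, Ne.symm]

theorem joinNL_cons (h : List Char) (t : List (List Char)) :
    PySem.Chars.join ['\n'] (h :: t) = h ++ (if t = [] then [] else '\n' :: PySem.Chars.join ['\n'] t) := by
  cases t with
  | nil => simp [PySem.Chars.join, List.intercalate]
  | cons a t => simp [PySem.Chars.join, List.intercalate, List.intersperse]

theorem char_eq_of_toNat {c d : Char} (h : c.toNat = d.toNat) : c = d :=
  Char.ext (UInt32.toNat_inj.mp h)

theorem dom_not_space {c : Char} (hd : pvDomChar c = true) (h1 : c ≠ '\n') (h2 : ¬(c = ' ' ∨ c = '\t' ∨ c = '\r')) :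
    PySem.Chars.isspace c = false := by
  push_neg at h2
  obtain ⟨h2a, h2b, h2c⟩ := h2
  have e10 : c.toNat ≠ 10 := fun h => h1 (char_eq_of_toNat (h.trans (by decide)))
  have e32 : c.toNat ≠ 32 := fun h => h2a (char_eq_of_toNat (h.trans (by decide)))
  have e9 : c.toNat ≠ 9 := fun h => h2b (char_eq_of_toNat (h.trans (by decide)))
  have e13 : c.toNat ≠ 13 := fun h => h2c (char_eq_of_toNat (h.trans (by decide)))
  simp only [pvDomChar, Bool.or_eq_true, Bool.and_eq_true, decide_eq_true_eq, beq_iff_eq] at hd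
  simp only [PySem.Chars.isspace, Bool.or_eq_false_iff, Bool.and_eq_false_iff,
    decide_eq_false_iff_not]
  omega

theorem pv_combined : ∀ (n : Nat) (cs : List Char), cs.length ≤ n → (∀ c ∈ cs, pvDomChar c = true) →
    ((∀ pend, (∀ x ∈ pend, x = ' ' ∨ x = '\t' ∨ x = '\r') →
        pvScan pend cs = PySem.Chars.join ['\n'] (((splitNL cs).modifyHead (pend ++ ·)).map gA))
     ∧ pvDrop cs = PySem.Chars.join ['\n'] ([] :: ((splitNL cs).tail.map gA))
     ∧ ∀ h t, splitNL cs = h :: t → pvCopy cs = PySem.Chars.join ['\n'] (h :: t.map gA)) := by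
  intro n
  induction n with
  | zero =>
    intro cs hlen _
    have : cs = [] := List.eq_nil_of_length_eq_zero (by omega)
    subst this
    refine ⟨?_, ?_, ?_⟩
    · intro pend hp
      simp [pvScan, splitNL, gA_allws pend hp]
    · simp [pvDrop, splitNL]
    · intro h t hs
      simp [splitNL] at hs
      obtain ⟨rfl, rfl⟩ := hs
      simp [pvCopy]
  | succ m ih =>
    intro cs hlen hdom
    cases cs with
    | nil =>
      refine ⟨?_, ?_, ?_⟩
      · intro pend hp
        simp [pvScan, splitNL, gA_allws pend hp]
      · simp [pvDrop, splitNL]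
      · intro h t hs
        simp [splitNL] at hs
        obtain ⟨rfl, rfl⟩ := hs
        simp [pvCopy]
    | cons c rest =>
      have hdomr : ∀ x ∈ rest, pvDomChar x = true := fun x hx => hdom x (List.mem_cons_of_mem c hx)
      have hdc : pvDomChar c = true := hdom c List.mem_cons_self
      obtain ⟨IHscan, IHdrop, IHcopy⟩ := ih rest (by simp at hlen; omega) hdomr
      have hscan0 : pvScan [] rest = PySem.Chars.join ['\n'] ((splitNL rest).map gA) := by
        rw [IHscan [] (by simp)]
        rw [show (fun x => ([] : List Char) ++ x) = (fun x => x) from funext (fun x => by simp)] at *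
        cases splitNL rest <;> simp
      obtain ⟨h', t', hsplit⟩ : ∃ h t, splitNL rest = h :: t := by
        cases hsp : splitNL rest with
        | nil => exact absurd hsp (splitNL_ne_nil rest)
        | cons h t => exact ⟨h, t, rfl⟩
      by_cases hnl : c = '\n'
      · subst hnl
        have hsp2 : splitNL ('\n' :: rest) = [] :: splitNL rest := by simp [splitNL]
        refine ⟨?_, ?_, ?_⟩
        · intro pend hp
          rw [pvScan, if_pos rfl, hscan0, hsp2]
          simp only [List.modifyHead_cons, List.map_cons, List.append_nil]
          rw [gA_allws pend hp, joinNL_cons]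
          simp [hsplit]
        · rw [pvDrop, if_pos rfl, hscan0, hsp2]
          simp only [List.tail_cons]
          rw [joinNL_cons]
          simp [hsplit]
        · intro h t hs
          rw [hsp2] at hs
          injection hs with e1 e2
          subst e2
          rw [pvCopy, if_pos rfl, hscan0, ← e1, joinNL_cons]
          simp [hsplit]
      · have hsp2 : splitNL (c :: rest) = (c :: h') :: t' := by
          simp [splitNL, hnl, hsplit]
        by_cases hws : c = ' ' ∨ c = '\t' ∨ c = '\r'
        · refine ⟨?_, ?_, ?_⟩
          · intro pend hp
            rw [pvScan, if_neg hnl, if_pos hws]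
            have hp' : ∀ x ∈ pend ++ [c], x = ' ' ∨ x = '\t' ∨ x = '\r' := by
              intro x hx
              rcases List.mem_append.1 hx with hmem | hmem
              · exact hp x hmem
              · simp at hmem; subst hmem; exact hws
            rw [IHscan (pend ++ [c]) hp']
            rw [hsp2, hsplit]
            simp
          · rw [pvDrop, if_neg hnl, IHdrop, hsp2, hsplit]
            simp
          · intro h t hs
            rw [hsp2] at hs
            injection hs with e1 e2
            subst e2
            rw [pvCopy, if_neg hnl, IHcopy h' t' hsplit, ← e1]
            rw [joinNL_cons, joinNL_cons]
            simp
        · have hcsp : PySem.Chars.isspace c = false := dom_not_space hdc hnl hws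
          by_cases hmg : c = '%' ∨ c = '!'
          · refine ⟨?_, ?_, ?_⟩
            · intro pend hp
              rw [pvScan, if_neg hnl, if_neg hws, if_pos hmg, IHdrop, hsp2, hsplit]
              simp only [List.modifyHead_cons, List.map_cons, List.tail_cons]
              rw [gA_line pend c h' hp hcsp, if_pos hmg]
            · rw [pvDrop, if_neg hnl, IHdrop, hsp2, hsplit]
              simp
            · intro h t hs
              rw [hsp2] at hs
              injection hs with e1 e2
              subst e2
              rw [pvCopy, if_neg hnl, IHcopy h' t' hsplit, ← e1]
              rw [joinNL_cons, joinNL_cons]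
              simp
          · refine ⟨?_, ?_, ?_⟩
            · intro pend hp
              rw [pvScan, if_neg hnl, if_neg hws, if_neg hmg, IHcopy h' t' hsplit, hsp2]
              simp only [List.modifyHead_cons, List.map_cons]
              rw [gA_line pend c h' hp hcsp, if_neg hmg, joinNL_cons, joinNL_cons]
              simp
            · rw [pvDrop, if_neg hnl, IHdrop, hsp2, hsplit]
              simp
            · intro h t hs
              rw [hsp2] at hs
              injection hs with e1 e2
              subst e2
              rw [pvCopy, if_neg hnl, IHcopy h' t' hsplit, ← e1]
              rw [joinNL_cons, joinNL_cons]
              simp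

-- ===== VERDICT (by name: the statement is the Claim_ definition above) =====
theorem preprocess_notebook_code_spec : Claim_equal_preprocess_notebook_code := by
  intro code hdom
  unfold Spec_preprocess_notebook_code preprocess_notebook_code preprocess_notebook_code_alt
  have hdomc : ∀ c ∈ code.toList, pvDomChar c = true := by
    have h := hdom
    unfold Dom_preprocess_notebook_code pvDomStr at h
    simpa [List.all_eq_true] using h
  have hfold : (PySem.Chars.splitOn code.toList ['\n']).foldl (fun lines line =>
      let stripped := PySem.Chars.strip line
      if PySem.Chars.startswith stripped ['%'] || PySem.Chars.startswith stripped ['!'] then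
        lines ++ [([] : List Char)]
      else if PySem.Chars.startswith stripped ['%', '%'] then
        lines ++ [([] : List Char)]
      else
        lines ++ [line]) [] = (splitNL code.toList).map gA := by
    rw [splitOn_eq]
    have hfun : (fun (lines : List (List Char)) line =>
        let stripped := PySem.Chars.strip line
        if PySem.Chars.startswith stripped ['%'] || PySem.Chars.startswith stripped ['!'] then
          lines ++ [([] : List Char)]
        else if PySem.Chars.startswith stripped ['%', '%'] then
          lines ++ [([] : List Char)]
        else
          lines ++ [line]) = fun lines line => lines ++ [gA line] := by
      funext lines line
      simp only [gA]
      split_ifs <;> rfl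
    rw [hfun, PySem.List.foldl_append_singleton_eq_map]
    simp
  have hscan : pvScan [] code.toList = PySem.Chars.join ['\n'] ((splitNL code.toList).map gA) := by
    obtain ⟨IHscan, -, -⟩ := pv_combined code.toList.length code.toList le_rfl hdomc
    rw [IHscan [] (by simp)]
    cases splitNL code.toList <;> simp
  show String.ofList (PySem.Chars.join ['\n'] _) = String.ofList (pvScan [] code.toList)
  rw [hfold, hscan]
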